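-- pv_equiv track=rewrite | github.com/adhithyan15/coding-adventures | code/packages/python/heap/tests/test_heap.py | is_valid_max_heap
-- ===== SOURCE A (Python) =====
-- def is_valid_max_heap(arr: list) -> bool:
--     """Return True iff arr satisfies the max-heap property at every node."""
--     n = len(arr)
--     for i in range(n):
--         left, right = 2 * i + 1, 2 * i + 2
--         if left < n and arr[i] < arr[left]:
--             return False
--         if right < n and arr[i] < arr[right]:
--             return False
--     return True
-- ===== SOURCE B (Python) =====
-- def is_valid_max_heap(arr: list) -> bool:
--     """Return True iff arr satisfies the max-heap property at every node.
--
--     Computes bottom-up subtree maxima in an auxiliary array m (sifting each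
--     value toward the root); arr is a max-heap iff m is a fixpoint (m == arr).
--     """
--     m = list(arr)
--     for i in range(len(arr) - 1, 0, -1):
--         p = (i - 1) // 2
--         if m[i] > m[p]:
--             m[p] = m[i]
--     return m == arr
-- ===== Notes on version B (the rewrite author's own statement) =====
-- stated objective: alternative
-- what changed: B computes bottom-up subtree maxima in an auxiliary array (sifting each value toward its parent, children before parents) and declares the heap valid iff that array is a fixpoint equal to arr, replacing A's direct parent-vs-children comparison scan with early exit.
import Mathlib
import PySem

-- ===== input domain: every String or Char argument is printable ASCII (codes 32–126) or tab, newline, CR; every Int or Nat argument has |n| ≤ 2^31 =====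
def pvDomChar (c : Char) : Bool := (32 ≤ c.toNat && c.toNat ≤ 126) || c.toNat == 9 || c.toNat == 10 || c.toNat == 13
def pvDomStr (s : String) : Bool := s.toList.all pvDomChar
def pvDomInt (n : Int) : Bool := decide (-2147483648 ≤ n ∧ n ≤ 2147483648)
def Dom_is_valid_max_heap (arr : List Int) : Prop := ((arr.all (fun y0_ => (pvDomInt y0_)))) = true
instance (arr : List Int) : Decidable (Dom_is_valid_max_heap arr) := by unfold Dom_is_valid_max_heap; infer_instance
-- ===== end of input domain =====

-- B replaces A's parent-vs-children scan by a bottom-up subtree-maximum sift with a final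
-- fixpoint check (alternative algorithm, same cost).

-- ===== PORT A =====
-- Loop 'for i in range(n)' with early return, as structural recursion on i.
-- All indexing (arr[i], arr[left], arr[right]) is guarded in range, so getD is exact.
def is_valid_max_heap_go (arr : List Int) (n i : Nat) : Bool :=
  if i < n then
    if 2 * i + 1 < n ∧ arr.getD i 0 < arr.getD (2 * i + 1) 0 then false
    else if 2 * i + 2 < n ∧ arr.getD i 0 < arr.getD (2 * i + 2) 0 then false
    else is_valid_max_heap_go arr n (i + 1)
  else true
termination_by n - i

def is_valid_max_heap (arr : List Int) : Bool :=
  is_valid_max_heap_go arr arr.length 0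

-- ===== PORT B =====
-- Loop 'for i in range(len(arr)-1, 0, -1)' sifting m[i] into its parent p = (i-1)//2;
-- recursion on the descending counter i (i = 0 ends the loop). Indices are in range, getD exact.
def is_valid_max_heap_alt_go (m : List Int) (i : Nat) : List Int :=
  match i with
  | 0 => m
  | Nat.succ j =>
      let p := ((j + 1) - 1) / 2
      let m' := if m.getD p 0 < m.getD (j + 1) 0 then m.set p (m.getD (j + 1) 0) else m
      is_valid_max_heap_alt_go m' j

-- 'm = list(arr)' then loop, then 'return m == arr'.
def is_valid_max_heap_alt (arr : List Int) : Bool :=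
  is_valid_max_heap_alt_go arr (arr.length - 1) == arr

-- ===== PRECONDITION & SPEC =====
def Spec_is_valid_max_heap (arr : List Int) (out : Bool) : Prop := out = is_valid_max_heap_alt arr
instance (arr : List Int) (out : Bool) : Decidable (Spec_is_valid_max_heap arr out) := by unfold Spec_is_valid_max_heap; infer_instance

-- ===== CLAIM (what is proved, stated in full; the proofs are below) =====
def Claim_equal_is_valid_max_heap : Prop := ∀ (arr : List Int), Dom_is_valid_max_heap arr → Spec_is_valid_max_heap arr (is_valid_max_heap arr)

-- ===== LEMMAS AND PROOFS =====

-- Maximum of the subtree rooted at k (proof-side characterisation of B's sift).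
def subMax (arr : List Int) (k : Nat) : Int :=
  if h2 : 2 * k + 2 < arr.length then
    max (arr.getD k 0) (max (subMax arr (2 * k + 1)) (subMax arr (2 * k + 2)))
  else if h1 : 2 * k + 1 < arr.length then
    max (arr.getD k 0) (subMax arr (2 * k + 1))
  else arr.getD k 0
termination_by arr.length - k

-- The value B's loop state holds at position k when the remaining counter is t:
-- entries above t are finished (subMax); entries ≤ t have absorbed exactly those children > t.
def Pstate (arr : List Int) (t k : Nat) : Int :=
  if t < k then subMax arr k
  else
    let a := arr.getD k 0
    let v1 := if t < 2 * k + 1 ∧ 2 * k + 1 < arr.length then max a (subMax arr (2 * k + 1)) else a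
    if t < 2 * k + 2 ∧ 2 * k + 2 < arr.length then max v1 (subMax arr (2 * k + 2)) else v1

theorem Pstate_eq_subMax (arr : List Int) (t k : Nat) (h : t < 2 * k + 1) :
    Pstate arr t k = subMax arr k := by
  by_cases hk : t < k
  · simp [Pstate, hk]
  · rw [Pstate, subMax]
    simp only [hk, if_false]
    split_ifs with a1 a2 a3 a4 a5 <;> simp_all <;> omega

theorem Pstate_init (arr : List Int) (k : Nat) (hk : k < arr.length) :
    Pstate arr (arr.length - 1) k = arr.getD k 0 := by
  rw [Pstate]
  split_ifs with a1 a2 a3 <;> first | rfl | omega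

theorem Pstate_step_other (arr : List Int) (t k : Nat) (ht : t + 1 < arr.length)
    (hk : k < arr.length) (hp : k ≠ t / 2) (hne : k ≠ t + 1) :
    Pstate arr t k = Pstate arr (t + 1) k := by
  by_cases hlt : t + 1 < k
  · simp [Pstate, hlt, show t < k by omega]
  · have hkt : ¬ t < k := by omega
    rw [Pstate, Pstate]
    simp only [hkt, if_false, show ¬ t + 1 < k by omega, if_false]
    have hl : 2 * k + 1 ≠ t + 1 := by omega
    have hr : 2 * k + 2 ≠ t + 1 := by omega
    have e1 : (t < 2 * k + 1 ∧ 2 * k + 1 < arr.length) ↔ (t + 1 < 2 * k + 1 ∧ 2 * k + 1 < arr.length) := by omega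
    have e2 : (t < 2 * k + 2 ∧ 2 * k + 2 < arr.length) ↔ (t + 1 < 2 * k + 2 ∧ 2 * k + 2 < arr.length) := by omega
    rw [if_congr e1 rfl rfl, if_congr e2 rfl rfl]

theorem Pstate_step_parent (arr : List Int) (t : Nat) (ht : t + 1 < arr.length) :
    Pstate arr t (t / 2) = max (Pstate arr (t + 1) (t / 2)) (subMax arr (t + 1)) := by
  rcases Nat.even_or_odd t with he | ho
  · -- t even: the left child 2*(t/2)+1 is t+1
    obtain ⟨c, hc⟩ := he
    have hl : 2 * (t / 2) + 1 = t + 1 := by omega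
    rw [Pstate, Pstate, hl]
    split_ifs <;> (try omega) <;> simp only [Int.max_def] <;> split_ifs <;> omega
  · -- t odd: the right child 2*(t/2)+2 is t+1
    obtain ⟨c, hc⟩ := ho
    have hr : 2 * (t / 2) + 2 = t + 1 := by omega
    rw [Pstate, Pstate, hr]
    split_ifs <;> (try omega) <;> simp only [Int.max_def]

theorem alt_go_length (m : List Int) (i : Nat) :
    (is_valid_max_heap_alt_go m i).length = m.length := by
  induction i generalizing m with
  | zero => rfl
  | succ j ih =>
      rw [is_valid_max_heap_alt_go]
      split_ifs <;> simp [ih]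

-- Main loop invariant: from state Pstate · t the loop finishes to subMax everywhere.
theorem alt_go_spec (arr : List Int) : ∀ t (m : List Int), t < arr.length →
    m.length = arr.length →
    (∀ k, k < arr.length → m.getD k 0 = Pstate arr t k) →
    ∀ k, k < arr.length → (is_valid_max_heap_alt_go m t).getD k 0 = subMax arr k := by
  intro t
  induction t with
  | zero =>
      intro m _ _ hm k hk
      rw [is_valid_max_heap_alt_go, hm k hk, Pstate_eq_subMax arr 0 k (by omega)]
  | succ j ih =>
      intro m hj hlen hm k hk
      rw [is_valid_max_heap_alt_go]
      set p := ((j + 1) - 1) / 2 with hpdef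
      have hp : p = j / 2 := by omega
      have hpn : p < arr.length := by omega
      have hjn : j + 1 < arr.length := hj
      have hppt : p ≠ j + 1 := by omega
      set m' := if m.getD p 0 < m.getD (j + 1) 0 then m.set p (m.getD (j + 1) 0) else m with hm'
      have hlen' : m'.length = arr.length := by
        rw [hm']; split_ifs <;> simp [hlen]
      have hmi : m.getD (j + 1) 0 = subMax arr (j + 1) := by
        rw [hm (j + 1) hjn, Pstate_eq_subMax arr (j + 1) (j + 1) (by omega)]
      have hm'p : m'.getD p 0 = max (m.getD p 0) (m.getD (j + 1) 0) := by
        rw [hm']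
        split_ifs with hc
        · rw [List.getD_eq_getElem?_getD, List.getElem?_set_self (by omega), Option.getD_some]
          omega
        · omega
      have hm'val : ∀ k, k < arr.length → m'.getD k 0 = Pstate arr j k := by
        intro k hk
        by_cases hkp : k = p
        · rw [hkp, hm'p, hm p hpn, hmi, hp, Pstate_step_parent arr j hjn]
        · have hmk : m'.getD k 0 = m.getD k 0 := by
            rw [hm']; split_ifs with hc
            · rw [List.getD_eq_getElem?_getD, List.getElem?_set_ne (by omega),
                ← List.getD_eq_getElem?_getD]
            · rfl
          rw [hmk, hm k hk]
          by_cases hki : k = j + 1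
          · subst hki
            rw [Pstate_eq_subMax arr j (j+1) (by omega),
              Pstate_eq_subMax arr (j+1) (j+1) (by omega)]
          · rw [Pstate_step_other arr j k hjn hk (hp ▸ hkp) hki]
      exact ih m' (by omega) hlen' hm'val k hk

-- A's loop from i accepts iff no child k ≥ 2*i+1 violates the heap property against its parent.
theorem go_iff (arr : List Int) (n i : Nat) :
    is_valid_max_heap_go arr n i = true ↔
      ∀ k, 2 * i + 1 ≤ k → k < n → ¬ (arr.getD ((k - 1) / 2) 0 < arr.getD k 0) := by
  generalize hm : n - i = m
  induction m generalizing i with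
  | zero =>
      rw [is_valid_max_heap_go]
      have : ¬ i < n := by omega
      simp [this]
      intro k hk1 hk2; omega
  | succ m ih =>
      rw [is_valid_max_heap_go]
      have hi : i < n := by omega
      simp only [hi, if_true]
      split_ifs with h1 h2
      · constructor
        · intro h; exact absurd h (by simp)
        · intro h
          have hx := h (2 * i + 1) le_rfl h1.1
          rw [show (2 * i + 1 - 1) / 2 = i from by omega] at hx
          exact absurd h1.2 hx
      · constructor
        · intro h; exact absurd h (by simp)
        · intro h
          have hx := h (2 * i + 2) (by omega) h2.1
          rw [show (2 * i + 2 - 1) / 2 = i from by omega] at hx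
          exact absurd h2.2 hx
      · rw [ih (i + 1) (by omega)]
        constructor
        · intro h k hk1 hk2
          rcases Nat.lt_or_ge k (2 * i + 3) with hlt | hge
          · have hk : k = 2 * i + 1 ∨ k = 2 * i + 2 := by omega
            rcases hk with rfl | rfl
            · intro hc
              exact h1 ⟨hk2, by rwa [show (2 * i + 1 - 1) / 2 = i from by omega] at hc⟩
            · intro hc
              exact h2 ⟨hk2, by rwa [show (2 * i + 2 - 1) / 2 = i from by omega] at hc⟩
          · exact h k (by omega) hk2
        · intro h k hk1 hk2; exact h k (by omega) hk2

theorem getD_le_subMax (arr : List Int) (k : Nat) : arr.getD k 0 ≤ subMax arr k := by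
  rw [subMax]; split_ifs <;> simp

theorem subMax_child_le (arr : List Int) (k j : Nat) (hj : j < arr.length)
    (hc : j = 2 * k + 1 ∨ j = 2 * k + 2) : subMax arr j ≤ subMax arr k := by
  conv_rhs => rw [subMax]
  rcases hc with rfl | rfl <;>
    split_ifs <;> omega

-- Heap property → every subtree maximum sits at its root.
theorem heap_subMax (arr : List Int)
    (H : ∀ k, 1 ≤ k → k < arr.length → ¬ (arr.getD ((k - 1) / 2) 0 < arr.getD k 0)) :
    ∀ fuel k, arr.length - k ≤ fuel → k < arr.length → subMax arr k = arr.getD k 0 := by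
  intro fuel
  induction fuel with
  | zero => intro k h1 h2; omega
  | succ f ih =>
      intro k h1 h2
      have hl : 2 * k + 1 < arr.length → subMax arr (2 * k + 1) = arr.getD (2 * k + 1) 0 :=
        fun h => ih (2 * k + 1) (by omega) h
      have hr : 2 * k + 2 < arr.length → subMax arr (2 * k + 2) = arr.getD (2 * k + 2) 0 :=
        fun h => ih (2 * k + 2) (by omega) h
      rw [subMax]
      split_ifs with c2 c1
      · rw [hl (by omega), hr (by omega)]
        have h1' := H (2 * k + 1) (by omega) (by omega)
        have h2' := H (2 * k + 2) (by omega) (by omega)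
        rw [show (2 * k + 1 - 1) / 2 = k by omega] at h1'
        rw [show (2 * k + 2 - 1) / 2 = k by omega] at h2'
        omega
      · rw [hl c1]
        have h1' := H (2 * k + 1) (by omega) (by omega)
        rw [show (2 * k + 1 - 1) / 2 = k by omega] at h1'
        omega
      · rfl

-- subtree maxima at the roots → heap property.
theorem subMax_heap (arr : List Int)
    (F : ∀ k, k < arr.length → subMax arr k = arr.getD k 0) :
    ∀ k, 1 ≤ k → k < arr.length → ¬ (arr.getD ((k - 1) / 2) 0 < arr.getD k 0) := by
  intro k hk1 hk2
  set p := (k - 1) / 2 with hp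
  have hc : k = 2 * p + 1 ∨ k = 2 * p + 2 := by omega
  have hpk : p < arr.length := by omega
  have h1 : arr.getD k 0 ≤ subMax arr k := getD_le_subMax arr k
  have h2 : subMax arr k ≤ subMax arr p := subMax_child_le arr p k hk2 hc
  rw [F p hpk] at h2
  omega

-- B accepts iff the sift array is a fixpoint iff the heap property holds.
theorem alt_iff (arr : List Int) :
    is_valid_max_heap_alt arr = true ↔
      ∀ k, 1 ≤ k → k < arr.length → ¬ (arr.getD ((k - 1) / 2) 0 < arr.getD k 0) := by
  unfold is_valid_max_heap_alt
  rw [beq_iff_eq]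
  rcases Nat.eq_zero_or_pos arr.length with h0 | hpos
  · rw [show arr.length - 1 = 0 by omega, is_valid_max_heap_alt_go]
    simp only [true_iff]
    intro k hk1 hk2; omega
  · have hgo : ∀ k, k < arr.length →
        (is_valid_max_heap_alt_go arr (arr.length - 1)).getD k 0 = subMax arr k := by
      apply alt_go_spec arr (arr.length - 1) arr (by omega) rfl
      intro k hk; exact (Pstate_init arr k hk).symm
    have hlen := alt_go_length arr (arr.length - 1)
    constructor
    · intro heq
      apply subMax_heap
      intro k hk
      rw [← hgo k hk, heq]
    · intro H
      have hfix : ∀ k, k < arr.length → subMax arr k = arr.getD k 0 :=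
        fun k hk => heap_subMax arr H arr.length k (by omega) hk
      apply List.ext_getElem (by omega)
      intro i hi1 hi2
      have : (is_valid_max_heap_alt_go arr (arr.length - 1)).getD i 0 = arr.getD i 0 := by
        rw [hgo i hi2, hfix i hi2]
      rwa [List.getD_eq_getElem?_getD, List.getD_eq_getElem?_getD,
        List.getElem?_eq_getElem hi1, List.getElem?_eq_getElem hi2,
        Option.getD_some, Option.getD_some] at this

-- ===== VERDICT (by name: the statement is the Claim_ definition above) =====
theorem is_valid_max_heap_spec : Claim_equal_is_valid_max_heap := by
  intro arr _
  unfold Spec_is_valid_max_heap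
  rw [Bool.eq_iff_iff, alt_iff]
  unfold is_valid_max_heap
  rw [go_iff]
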